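-- pv_equiv track=rewrite | github.com/6puritans9/Algorithms | Boj/Gold/graph/disjoint_set/1043.py | find_max_parties
-- ===== SOURCE A (Python) =====
-- from collections import deque
--
-- def find(x: int, parent: list[int]) -> int:
--     if parent[x] != x:
--         parent[x] = find(parent[x], parent)
--
--     return parent[x]
--
-- def union(x: int, y: int, parent: list[int]) -> None:
--     root_x = find(x, parent)
--     root_y = find(y, parent)
--
--     if root_x != root_y:
--         parent[root_y] = root_x
--
-- def find_max_parties(n: int, unmaskers: list[int], parties: deque[tuple[int, ...]]) -> int:
--     # TC = O(MN)
--     # SC = O(N)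
--
--     parent = [i for i in range(n + 1)]
--
--     for party in parties:
--         base = party[0]
--
--         for attendee in party[1:]:
--             union(base, attendee, parent)
--
--     truth_roots = set(find(u, parent) for u in unmaskers)
--
--     result = 0
--     for party in parties:
--         if not any(find(attendee, parent) in truth_roots for attendee in party):
--             result += 1
--
--     return result
-- ===== SOURCE B (Python) =====
-- def find_max_parties(n, unmaskers, parties):
--     # quick-find: keep an explicit component label per node instead of a parent forest
--     comp = list(range(n + 1))
--     for party in parties:
--         base = comp[party[0]]
--         for attendee in party[1:]:
--             old = comp[attendee]
--             if old != base:
--                 comp = [base if c == old else c for c in comp]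
--     truth = set()
--     for u in unmaskers:
--         truth.add(comp[u])
--     result = 0
--     for party in parties:
--         ok = True
--         for a in party:
--             if comp[a] in truth:
--                 ok = False
--                 break
--         if ok:
--             result += 1
--     return result
-- ===== Notes on version B (the rewrite author's own statement) =====
-- stated objective: alternative
-- what changed: Replaces A's recursive path-compressing union-find (parent forest mutated by find/union) with a quick-find scheme: a flat component-label array where each merge relabels the losing class in one comprehension pass, so no parent chains, no recursion and no path compression exist in B.
import Mathlib
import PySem

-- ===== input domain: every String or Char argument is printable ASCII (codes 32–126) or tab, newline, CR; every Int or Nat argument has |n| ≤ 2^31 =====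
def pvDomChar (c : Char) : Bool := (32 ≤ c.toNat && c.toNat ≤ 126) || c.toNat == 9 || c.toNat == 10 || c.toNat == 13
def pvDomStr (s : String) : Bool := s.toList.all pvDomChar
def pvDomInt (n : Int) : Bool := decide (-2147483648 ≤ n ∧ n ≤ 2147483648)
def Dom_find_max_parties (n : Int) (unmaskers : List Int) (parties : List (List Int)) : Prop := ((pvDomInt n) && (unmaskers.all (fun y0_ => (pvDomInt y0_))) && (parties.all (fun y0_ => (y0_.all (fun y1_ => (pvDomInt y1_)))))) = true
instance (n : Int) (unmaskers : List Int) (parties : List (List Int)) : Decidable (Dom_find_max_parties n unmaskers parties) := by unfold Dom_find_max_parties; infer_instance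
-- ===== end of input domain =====

-- B replaces A's path-compressing union-find by a quick-find component-label array
-- (whole-array relabelling on each merge); objective: alternative algorithm, not faster.

-- ===== PORT A =====
-- find(x, parent): recursive find with path compression; the fuel argument only makes the
-- Python recursion (which terminates on every input A accepts) structurally total.
def findA : Nat → Int → List Int → Option (Int × List Int)
  | 0, _, _ => none
  | fuel+1, x, parent =>
    match PySem.List.pyGet? parent x with
    | none => none
    | some px =>
      if px ≠ x then
        match findA fuel px parent with
        | none => none
        | some (r, p1) =>
          match PySem.List.pySet? p1 x r with
          | none => none
          | some p2 =>
            match PySem.List.pyGet? p2 x with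
            | none => none
            | some v => some (v, p2)
      else some (px, parent)

-- union(x, y, parent)
def unionA (x y : Int) (parent : List Int) : Option (List Int) :=
  match findA (parent.length + 1) x parent with
  | none => none
  | some (rx, p1) =>
    match findA (p1.length + 1) y p1 with
    | none => none
    | some (ry, p2) =>
      if rx ≠ ry then PySem.List.pySet? p2 ry rx else some p2

-- for attendee in party[1:]: union(base, attendee, parent)
def attendLoopA (base : Int) : List Int → List Int → Option (List Int)
  | [], parent => some parent
  | a :: rest, parent =>
    match unionA base a parent with
    | none => none
    | some p' => attendLoopA base rest p'

-- for party in parties: base = party[0]; …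
def partiesLoopA : List (List Int) → List Int → Option (List Int)
  | [], parent => some parent
  | party :: rest, parent =>
    match PySem.List.pyGet? party 0 with
    | none => none
    | some base =>
      match attendLoopA base (PySem.List.slice party (some 1) none) parent with
      | none => none
      | some p' => partiesLoopA rest p'

-- truth_roots = set(find(u, parent) for u in unmaskers)   (find mutates parent)
def trootsLoopA : List Int → PySem.Set Int → List Int → Option (PySem.Set Int × List Int)
  | [], acc, parent => some (acc, parent)
  | u :: rest, acc, parent =>
    match findA (parent.length + 1) u parent with
    | none => none
    | some (r, p') => trootsLoopA rest (PySem.Set.add acc r) p'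

-- any(find(attendee, parent) in truth_roots for attendee in party)   (short-circuits)
def anyLoopA (tr : PySem.Set Int) : List Int → List Int → Option (Bool × List Int)
  | [], parent => some (false, parent)
  | a :: rest, parent =>
    match findA (parent.length + 1) a parent with
    | none => none
    | some (r, p') =>
      if PySem.Set.contains tr r then some (true, p') else anyLoopA tr rest p'

-- result loop
def countLoopA (tr : PySem.Set Int) : List (List Int) → Int → List Int → Option Int
  | [], res, _ => some res
  | party :: rest, res, parent =>
    match anyLoopA tr party parent with
    | none => none
    | some (b, p') => countLoopA tr rest (if b then res else res + 1) p'

def find_max_parties (n : Int) (unmaskers : List Int) (parties : List (List Int)) : Int :=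
  let parent := PySem.List.pyRange 0 (n + 1) 1
  match partiesLoopA parties parent with
  | none => 0
  | some p1 =>
    match trootsLoopA unmaskers PySem.Set.empty p1 with
    | none => 0
    | some (tr, p2) =>
      match countLoopA tr parties 0 p2 with
      | none => 0
      | some r => r

-- ===== PORT B =====
-- comp = [base if c == old else c for c in comp]
def mergeB (comp : List Int) (old base : Int) : List Int :=
  comp.map (fun c => if c = old then base else c)

-- for attendee in party[1:]: old = comp[attendee]; if old != base: relabel
def attendLoopB (base : Int) : List Int → List Int → Option (List Int)
  | [], comp => some comp
  | a :: rest, comp =>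
    match PySem.List.pyGet? comp a with
    | none => none
    | some old =>
      attendLoopB base rest (if old ≠ base then mergeB comp old base else comp)

-- for party in parties: base = comp[party[0]]; …
def partiesLoopB : List (List Int) → List Int → Option (List Int)
  | [], comp => some comp
  | party :: rest, comp =>
    match PySem.List.pyGet? party 0 with
    | none => none
    | some p0 =>
      match PySem.List.pyGet? comp p0 with
      | none => none
      | some base =>
        match attendLoopB base (PySem.List.slice party (some 1) none) comp with
        | none => none
        | some c' => partiesLoopB rest c'

-- truth = set(); for u in unmaskers: truth.add(comp[u])
def truthLoopB : List Int → PySem.Set Int → List Int → Option (PySem.Set Int)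
  | [], acc, _ => some acc
  | u :: rest, acc, comp =>
    match PySem.List.pyGet? comp u with
    | none => none
    | some c => truthLoopB rest (PySem.Set.add acc c) comp

-- ok = True; for a in party: if comp[a] in truth: ok = False; break
def allLoopB (tr : PySem.Set Int) : List Int → List Int → Option Bool
  | [], _ => some true
  | a :: rest, comp =>
    match PySem.List.pyGet? comp a with
    | none => none
    | some c =>
      if PySem.Set.contains tr c then some false else allLoopB tr rest comp

-- result loop
def countLoopB (tr : PySem.Set Int) : List (List Int) → Int → List Int → Option Int
  | [], res, _ => some res
  | party :: rest, res, comp =>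
    match allLoopB tr party comp with
    | none => none
    | some b => countLoopB tr rest (if b then res + 1 else res) comp

def find_max_parties_alt (n : Int) (unmaskers : List Int) (parties : List (List Int)) : Int :=
  let comp := PySem.List.pyRange 0 (n + 1) 1
  match partiesLoopB parties comp with
  | none => 0
  | some c1 =>
    match truthLoopB unmaskers PySem.Set.empty c1 with
    | none => 0
    | some tr =>
      match countLoopB tr parties 0 c1 with
      | none => 0
      | some r => r

-- ===== PRECONDITION & SPEC =====
-- Pre_ excludes exactly the inputs on which the Python A raises IndexError: an empty party
-- (party[0]), or any unmasker/attendee outside Python's accepted index range -(n+1) … n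
-- for the length-(n+1) parent list.
def Pre_find_max_parties (n : Int) (unmaskers : List Int) (parties : List (List Int)) : Prop :=
  (∀ p ∈ parties, p ≠ []) ∧
  (∀ x ∈ unmaskers, -(n + 1) ≤ x ∧ x ≤ n) ∧
  (∀ p ∈ parties, ∀ x ∈ p, -(n + 1) ≤ x ∧ x ≤ n)
instance (n : Int) (unmaskers : List Int) (parties : List (List Int)) : Decidable (Pre_find_max_parties n unmaskers parties) := by unfold Pre_find_max_parties; infer_instance

def pvWitness_find_max_parties : Int × List Int × List (List Int) := (2, [0], [[1, 2]])

def Spec_find_max_parties (n : Int) (unmaskers : List Int) (parties : List (List Int)) (out : Int) : Prop := out = find_max_parties_alt n unmaskers parties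
instance (n : Int) (unmaskers : List Int) (parties : List (List Int)) (out : Int) : Decidable (Spec_find_max_parties n unmaskers parties out) := by unfold Spec_find_max_parties; infer_instance

-- ===== CLAIM (what is proved, stated in full; the proofs are below) =====
def Claim_equal_find_max_parties : Prop := ∀ (n : Int) (unmaskers : List Int) (parties : List (List Int)), Dom_find_max_parties n unmaskers parties → Pre_find_max_parties n unmaskers parties → Spec_find_max_parties n unmaskers parties (find_max_parties n unmaskers parties)

-- ===== LEMMAS AND PROOFS =====

def stepP (p : List Int) (j : Nat) : Nat := (p.getD j 0).toNat
def isRootP (p : List Int) (j : Nat) : Prop := p.getD j 0 = (j : Int)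
def rootp (p : List Int) (j : Nat) : Nat := (stepP p)^[p.length] j
def BoundsP (p : List Int) : Prop := ∀ j < p.length, 0 ≤ p.getD j 0 ∧ p.getD j 0 < (p.length : Int)
def AcycP (p : List Int) : Prop := ∀ j < p.length, ∃ m, isRootP p ((stepP p)^[m] j)

lemma stepP_lt {p : List Int} (hB : BoundsP p) {j : Nat} (hj : j < p.length) :
    stepP p j < p.length := by
  obtain ⟨h1, h2⟩ := hB j hj; unfold stepP; omega

lemma iter_lt {p : List Int} (hB : BoundsP p) {j : Nat} (hj : j < p.length) (m : Nat) :
    (stepP p)^[m] j < p.length := by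
  induction m generalizing j with
  | zero => simpa using hj
  | succ k ih => rw [Function.iterate_succ_apply]; exact ih (stepP_lt hB hj)

lemma stepP_of_isRoot {p : List Int} {j : Nat} (h : isRootP p j) : stepP p j = j := by
  unfold stepP; rw [h]; simp

lemma iter_stay {p : List Int} {j : Nat} (h : isRootP p j) (k : Nat) :
    (stepP p)^[k] j = j := by
  induction k with
  | zero => rfl
  | succ k ih => rw [Function.iterate_succ_apply', ih, stepP_of_isRoot h]

lemma iter_absorb {p : List Int} {j m : Nat} (h : isRootP p ((stepP p)^[m] j)) (k : Nat)
    (hk : m ≤ k) : (stepP p)^[k] j = (stepP p)^[m] j := by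
  have h2 := iter_stay h (k - m)
  calc (stepP p)^[k] j = (stepP p)^[k - m] ((stepP p)^[m] j) := by
        rw [← Function.iterate_add_apply]; congr 1; omega
    _ = (stepP p)^[m] j := h2

lemma pigeon {p : List Int} (hB : BoundsP p) {j k : Nat} (hj : j < p.length)
    (h : isRootP p ((stepP p)^[k] j)) :
    ∃ m, m < p.length ∧ m ≤ k ∧ isRootP p ((stepP p)^[m] j) := by
  classical
  have hex : ∃ m, isRootP p ((stepP p)^[m] j) := ⟨k, h⟩
  set m := Nat.find hex with hmdef
  have hm : isRootP p ((stepP p)^[m] j) := Nat.find_spec hex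
  have hmk : m ≤ k := Nat.find_min' hex h
  refine ⟨m, ?_, hmk, hm⟩
  by_contra hge
  rw [not_lt] at hge
  -- the m+1 iterates j, step j, …, iter^m j are pairwise distinct
  have hinj : ∀ a ∈ List.range (m+1), ∀ b ∈ List.range (m+1),
      (stepP p)^[a] j = (stepP p)^[b] j → a = b := by
    intro a ha b hb hab
    simp only [List.mem_range] at ha hb
    by_contra hne
    rcases Nat.lt_or_ge a b with hlt | hge2
    · have : isRootP p ((stepP p)^[a + (m - b)] j) := by
        have : (stepP p)^[a + (m - b)] j = (stepP p)^[m] j := by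
          calc (stepP p)^[a + (m-b)] j = (stepP p)^[m - b] ((stepP p)^[a] j) := by
                rw [← Function.iterate_add_apply]; congr 1; omega
            _ = (stepP p)^[m - b] ((stepP p)^[b] j) := by rw [hab]
            _ = (stepP p)^[m] j := by rw [← Function.iterate_add_apply]; congr 1; omega
        rw [this]; exact hm
      have := Nat.find_min hex (m := a + (m - b)) (by omega)
      exact this ‹_›
    · rcases Nat.lt_or_ge b a with hlt2 | hge3
      · have : isRootP p ((stepP p)^[b + (m - a)] j) := by
          have : (stepP p)^[b + (m - a)] j = (stepP p)^[m] j := by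
            calc (stepP p)^[b + (m-a)] j = (stepP p)^[m - a] ((stepP p)^[b] j) := by
                  rw [← Function.iterate_add_apply]; congr 1; omega
              _ = (stepP p)^[m - a] ((stepP p)^[a] j) := by rw [hab]
              _ = (stepP p)^[m] j := by rw [← Function.iterate_add_apply]; congr 1; omega
          rw [this]; exact hm
        have := Nat.find_min hex (m := b + (m - a)) (by omega)
        exact this ‹_›
      · omega
  have hnodup : ((List.range (m+1)).map (fun a => (stepP p)^[a] j)).Nodup :=
    List.Nodup.map_on hinj (List.nodup_range)
  have hsub : ((List.range (m+1)).map (fun a => (stepP p)^[a] j)).toFinset ⊆ Finset.range p.length := by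
    intro x hx
    simp only [List.mem_toFinset, List.mem_map, List.mem_range] at hx
    obtain ⟨a, _, rfl⟩ := hx
    simpa [Finset.mem_range] using iter_lt hB hj a
  have hcard := Finset.card_le_card hsub
  rw [List.toFinset_card_of_nodup hnodup] at hcard
  simp at hcard
  omega

lemma root_reach {p : List Int} (hB : BoundsP p) {j k : Nat} (hj : j < p.length)
    (h : isRootP p ((stepP p)^[k] j)) :
    (stepP p)^[k] j = rootp p j ∧ isRootP p (rootp p j) := by
  obtain ⟨m, hmlt, hmk, hm⟩ := pigeon hB hj h
  have h1 : (stepP p)^[k] j = (stepP p)^[m] j := iter_absorb hm k hmk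
  have h2 : rootp p j = (stepP p)^[m] j := iter_absorb hm p.length (by omega)
  constructor
  · rw [h1, h2]
  · rw [h2, ← h1]; exact h

lemma rootp_isRoot {p : List Int} (hB : BoundsP p) (hA : AcycP p) {j : Nat}
    (hj : j < p.length) : isRootP p (rootp p j) := by
  obtain ⟨m, hm⟩ := hA j hj
  exact (root_reach hB hj hm).2

lemma rootp_lt {p : List Int} (hB : BoundsP p) {j : Nat} (hj : j < p.length) :
    rootp p j < p.length := iter_lt hB hj p.length

lemma rootp_fix {p : List Int} (hB : BoundsP p) {j : Nat} (hj : j < p.length)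
    (h : isRootP p j) : rootp p j = j := by
  have := root_reach hB (k := 0) hj (by simpa using h)
  simpa using this.1.symm

lemma rootp_step {p : List Int} (hB : BoundsP p) (hA : AcycP p) {j : Nat}
    (hj : j < p.length) : rootp p (stepP p j) = rootp p j := by
  have hr : isRootP p (rootp p j) := rootp_isRoot hB hA hj
  have h1 : (stepP p)^[p.length + 1] j = rootp p j := iter_absorb hr (p.length + 1) (by omega)
  have h2 : (stepP p)^[p.length] (stepP p j) = (stepP p)^[p.length + 1] j := by
    rw [Function.iterate_succ_apply]
  have : isRootP p ((stepP p)^[p.length] (stepP p j)) := by rw [h2, h1]; exact hr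
  have := (root_reach hB (stepP_lt hB hj) this).1
  rw [← this, h2, h1]

-- getD/set facts
lemma getD_set_self (p : List Int) (i : Nat) (v : Int) (h : i < p.length) :
    (p.set i v).getD i 0 = v := by
  rw [List.getD_eq_getElem?_getD, List.getElem?_set_self (by simpa using h)]
  simp
lemma getD_set_ne (p : List Int) (i j : Nat) (v : Int) (h : j ≠ i) :
    (p.set i v).getD j 0 = p.getD j 0 := by
  rw [List.getD_eq_getElem?_getD, List.getElem?_set_ne (by omega), ← List.getD_eq_getElem?_getD]

-- after writing p[i] := rootp p i (path compression), roots are unchanged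
lemma compress_lemma {p : List Int} (hB : BoundsP p) (hA : AcycP p) {i : Nat}
    (hi : i < p.length) :
    (p.set i ((rootp p i : Nat) : Int)).length = p.length ∧
    BoundsP (p.set i ((rootp p i : Nat) : Int)) ∧
    AcycP (p.set i ((rootp p i : Nat) : Int)) ∧
    (∀ j < p.length, rootp (p.set i ((rootp p i : Nat) : Int)) j = rootp p j) := by
  set r := rootp p i with hr
  set p' := p.set i ((r : Nat) : Int) with hp'
  have hlen : p'.length = p.length := by simp [hp']
  have hrlt : r < p.length := rootp_lt hB hi
  have hstep' : ∀ j < p.length, stepP p' j = if j = i then r else stepP p j := by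
    intro j hj
    unfold stepP
    by_cases hji : j = i
    · rw [if_pos hji, hji, getD_set_self p i _ (hji ▸ hj)]; simp
    · rw [if_neg hji, getD_set_ne p i j _ hji]
  have hB' : BoundsP p' := by
    intro j hj
    rw [hlen] at hj ⊢
    by_cases hji : j = i
    · subst hji; rw [getD_set_self p j _ hj]; constructor <;> omega
    · rw [getD_set_ne p i j _ hji]; exact hB j hj
  -- roots of p are roots of p'
  have hroot' : ∀ t, t < p.length → isRootP p t → isRootP p' t := by
    intro t ht hroot
    by_cases hti : t = i
    · subst hti
      have : r = t := rootp_fix hB ht hroot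
      unfold isRootP; rw [getD_set_self p t _ ht, this]
    · unfold isRootP; rw [getD_set_ne p i t _ hti]; exact hroot
  -- reach: from any j, p' reaches rootp p j
  have hreach : ∀ m j, j < p.length → isRootP p ((stepP p)^[m] j) →
      ∃ k, (stepP p')^[k] j = rootp p j := by
    intro m
    induction m with
    | zero =>
      intro j hj hroot
      simp at hroot
      exact ⟨0, by simpa using (rootp_fix hB hj hroot).symm⟩
    | succ m ih =>
      intro j hj hroot
      by_cases hroots : isRootP p j
      · exact ⟨0, by simpa using (rootp_fix hB hj hroots).symm⟩
      · by_cases hji : j = i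
        · subst hji
          refine ⟨1, ?_⟩
          simp [hstep' j hj, hr]
        · have hsj : (stepP p)^[m] (stepP p j) = (stepP p)^[m+1] j := by
            rw [Function.iterate_succ_apply]
          obtain ⟨k, hk⟩ := ih (stepP p j) (stepP_lt hB hj) (by rw [hsj]; exact hroot)
          refine ⟨k + 1, ?_⟩
          rw [Function.iterate_succ_apply, hstep' j hj, if_neg hji, hk, rootp_step hB hA hj]
  have hA' : AcycP p' := by
    intro j hj
    rw [hlen] at hj
    obtain ⟨m, hm⟩ := hA j hj
    obtain ⟨k, hk⟩ := hreach m j hj hm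
    exact ⟨k, by rw [hk]; exact hroot' _ (rootp_lt hB hj) (rootp_isRoot hB hA hj)⟩
  refine ⟨hlen, hB', hA', ?_⟩
  intro j hj
  obtain ⟨m, hm⟩ := hA j hj
  obtain ⟨k, hk⟩ := hreach m j hj hm
  have : isRootP p' ((stepP p')^[k] j) := by
    rw [hk]; exact hroot' _ (rootp_lt hB hj) (rootp_isRoot hB hA hj)
  have := (root_reach hB' (by rw [hlen]; exact hj) this).1
  rw [← this, hk]

-- union write: p[ry] := rx with rx ≠ ry both roots
lemma union_lemma {p : List Int} (hB : BoundsP p) (hA : AcycP p) {rx ry : Nat}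
    (hrx : rx < p.length) (hry : ry < p.length)
    (hrootx : isRootP p rx) (hrooty : isRootP p ry) (hne : rx ≠ ry) :
    (p.set ry ((rx : Nat) : Int)).length = p.length ∧
    BoundsP (p.set ry ((rx : Nat) : Int)) ∧
    AcycP (p.set ry ((rx : Nat) : Int)) ∧
    (∀ j < p.length, rootp (p.set ry ((rx : Nat) : Int)) j =
      if rootp p j = ry then rx else rootp p j) := by
  set p' := p.set ry ((rx : Nat) : Int) with hp'
  have hlen : p'.length = p.length := by simp [hp']
  have hstep' : ∀ j < p.length, stepP p' j = if j = ry then rx else stepP p j := by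
    intro j hj
    unfold stepP
    by_cases hji : j = ry
    · rw [if_pos hji, hji, getD_set_self p ry _ (hji ▸ hj)]; simp
    · rw [if_neg hji, getD_set_ne p ry j _ hji]
  have hB' : BoundsP p' := by
    intro j hj
    rw [hlen] at hj ⊢
    by_cases hji : j = ry
    · subst hji; rw [getD_set_self p j _ hj]; constructor <;> omega
    · rw [getD_set_ne p ry j _ hji]; exact hB j hj
  have hrx' : isRootP p' rx := by
    unfold isRootP; rw [getD_set_ne p ry rx _ hne]; exact hrootx
  have htarget : ∀ j, j < p.length → isRootP p' (if rootp p j = ry then rx else rootp p j) := by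
    intro j hj
    by_cases hc : rootp p j = ry
    · simpa [hc] using hrx'
    · rw [if_neg hc]
      unfold isRootP
      rw [getD_set_ne p ry _ _ hc]
      exact rootp_isRoot hB hA hj
  have hreach : ∀ m j, j < p.length → isRootP p ((stepP p)^[m] j) →
      ∃ k, (stepP p')^[k] j = (if rootp p j = ry then rx else rootp p j) := by
    intro m
    induction m with
    | zero =>
      intro j hj hroot
      simp at hroot
      have hfix : rootp p j = j := rootp_fix hB hj hroot
      by_cases hjy : j = ry
      · subst hjy
        refine ⟨1, ?_⟩
        simp [hstep' j hj, hfix]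
      · exact ⟨0, by simp [hfix, hjy]⟩
    | succ m ih =>
      intro j hj hroot
      by_cases hroots : isRootP p j
      · have hfix : rootp p j = j := rootp_fix hB hj hroots
        by_cases hjy : j = ry
        · subst hjy
          refine ⟨1, ?_⟩
          simp [hstep' j hj, hfix]
        · exact ⟨0, by simp [hfix, hjy]⟩
      · have hjy : j ≠ ry := by
          intro hjeq; subst hjeq; exact hroots hrooty
        have hsj : (stepP p)^[m] (stepP p j) = (stepP p)^[m+1] j := by
          rw [Function.iterate_succ_apply]
        obtain ⟨k, hk⟩ := ih (stepP p j) (stepP_lt hB hj) (by rw [hsj]; exact hroot)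
        refine ⟨k + 1, ?_⟩
        rw [Function.iterate_succ_apply, hstep' j hj, if_neg hjy, hk, rootp_step hB hA hj]
  have hA' : AcycP p' := by
    intro j hj
    rw [hlen] at hj
    obtain ⟨m, hm⟩ := hA j hj
    obtain ⟨k, hk⟩ := hreach m j hj hm
    exact ⟨k, by rw [hk]; exact htarget j hj⟩
  refine ⟨hlen, hB', hA', ?_⟩
  intro j hj
  obtain ⟨m, hm⟩ := hA j hj
  obtain ⟨k, hk⟩ := hreach m j hj hm
  have : isRootP p' ((stepP p')^[k] j) := by rw [hk]; exact htarget j hj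
  have := (root_reach hB' (by rw [hlen]; exact hj) this).1
  rw [← this, hk]

def normIdx (N : Nat) (x : Int) : Nat := (if x < 0 then x + N else x).toNat
def InR (N : Nat) (x : Int) : Prop := -(N:Int) ≤ x ∧ x < N

lemma normIdx_lt {N : Nat} {x : Int} (h : InR N x) : normIdx N x < N := by
  obtain ⟨h1, h2⟩ := h; unfold normIdx; split <;> omega

lemma normIdx_of_nonneg {N : Nat} {x : Int} (hx : 0 ≤ x) : normIdx N x = x.toNat := by
  unfold normIdx; split <;> omega

lemma pyIdx?_norm (N : Nat) (x : Int) (h : InR N x) :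
    PySem.List.pyIdx? N x = some (normIdx N x) := by
  obtain ⟨h1, h2⟩ := h
  unfold PySem.List.pyIdx?
  by_cases hx : 0 ≤ x
  · rw [if_pos hx, if_pos h2]
    congr 1
    rw [normIdx_of_nonneg hx]
  · rw [if_neg hx, if_pos h1]
    congr 1
    unfold normIdx
    rw [if_pos (by omega : x < 0)]
    omega

lemma pyGet?_norm (xs : List Int) (x : Int) (h : InR xs.length x) :
    PySem.List.pyGet? xs x = some (xs.getD (normIdx xs.length x) 0) := by
  have hlt := normIdx_lt h
  show (PySem.List.pyIdx? xs.length x).bind _ = _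
  rw [pyIdx?_norm xs.length x h]
  simp [List.getD_eq_getElem?_getD, List.getElem?_eq_getElem hlt]

lemma pySet?_norm (xs : List Int) (x : Int) (v : Int) (h : InR xs.length x) :
    PySem.List.pySet? xs x v = some (xs.set (normIdx xs.length x) v) := by
  unfold PySem.List.pySet?
  rw [pyIdx?_norm xs.length x h]
  rfl

lemma normIdx_natCast (N k : Nat) : normIdx N ((k : Nat) : Int) = k := by
  unfold normIdx; split <;> omega

lemma findA_root_case {fuel : Nat} {p : List Int} {x : Int} (hB : BoundsP p) (hA : AcycP p)
    (hx : InR p.length x) (hroot : isRootP p (normIdx p.length x)) (hf : 2 ≤ fuel) :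
    ∃ p', findA fuel x p = some (((rootp p (normIdx p.length x) : Nat) : Int), p') ∧
      p'.length = p.length ∧ BoundsP p' ∧ AcycP p' ∧
      (∀ j < p.length, rootp p' j = rootp p j) := by
  obtain ⟨g, rfl⟩ : ∃ g, fuel = g + 1 + 1 := ⟨fuel - 2, by omega⟩
  have hixlt : normIdx p.length x < p.length := normIdx_lt hx
  have hfix : rootp p (normIdx p.length x) = normIdx p.length x := rootp_fix hB hixlt hroot
  have hget := pyGet?_norm p x hx
  have hpxval : p.getD (normIdx p.length x) 0 = ((normIdx p.length x : Nat) : Int) := hroot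
  by_cases hpx : p.getD (normIdx p.length x) 0 = x
  · refine ⟨p, ?_, rfl, hB, hA, fun j _ => rfl⟩
    rw [findA, hget]
    simp only [ne_eq, hpx, not_true_eq_false, if_false]
    rw [hfix, ← hpxval, hpx]
  · -- x is negative here; the recursive call hits the root at once
    have hinner : findA (g + 1) (p.getD (normIdx p.length x) 0) p =
        some (p.getD (normIdx p.length x) 0, p) := by
      have hinr : InR p.length ((normIdx p.length x : Nat) : Int) := by
        constructor <;> omega
      rw [findA]
      rw [hpxval, pyGet?_norm p _ hinr, normIdx_natCast, ← hpxval]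
      simp
    have hxin : InR p.length x := hx
    have hset := pySet?_norm p x (p.getD (normIdx p.length x) 0) hxin
    obtain ⟨hlen2, hB2, hA2, hpres2⟩ := compress_lemma hB hA (i := normIdx p.length x) hixlt
    have hveq : p.getD (normIdx p.length x) 0 = ((rootp p (normIdx p.length x) : Nat) : Int) := by
      rw [hfix, hpxval]
    set p2 := p.set (normIdx p.length x) (((rootp p (normIdx p.length x) : Nat) : Int)) with hp2
    have hxin2 : InR p2.length x := by rw [hlen2]; exact hx
    have hget2 := pyGet?_norm p2 x hxin2
    have hnorm2 : normIdx p2.length x = normIdx p.length x := by rw [hlen2]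
    rw [hnorm2] at hget2
    have hval2 : p2.getD (normIdx p.length x) 0 = ((rootp p (normIdx p.length x) : Nat) : Int) :=
      getD_set_self p _ _ hixlt
    have hset' : PySem.List.pySet? p x (p.getD (normIdx p.length x) 0) = some p2 := by
      rw [hveq] at hset ⊢
      rw [hset]
    refine ⟨p2, ?_, hlen2, hB2, hA2, hpres2⟩
    rw [findA, hget]
    simp only [if_pos hpx, hinner, hset', hget2, hval2]

lemma findA_ok : ∀ (m fuel : Nat) (p : List Int) (x : Int), BoundsP p → AcycP p →
    InR p.length x → isRootP p ((stepP p)^[m] (normIdx p.length x)) → m + 1 < fuel →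
    ∃ p', findA fuel x p = some (((rootp p (normIdx p.length x) : Nat) : Int), p') ∧
      p'.length = p.length ∧ BoundsP p' ∧ AcycP p' ∧
      (∀ j < p.length, rootp p' j = rootp p j) := by
  intro m
  induction m with
  | zero =>
    intro fuel p x hB hA hx hroot hfuel
    simp only [Function.iterate_zero, id] at hroot
    exact findA_root_case (fuel := fuel) hB hA hx hroot (by omega)
  | succ m ih =>
    intro fuel p x hB hA hx hroot hfuel
    by_cases hroot0 : isRootP p (normIdx p.length x)
    · exact findA_root_case (fuel := fuel) hB hA hx hroot0 (by omega)
    · obtain ⟨f, rfl⟩ : ∃ f, fuel = f + 1 := ⟨fuel - 1, by omega⟩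
      have hixlt : normIdx p.length x < p.length := normIdx_lt hx
      have hget := pyGet?_norm p x hx
      have hpxb := hB (normIdx p.length x) hixlt
      have hpxne : p.getD (normIdx p.length x) 0 ≠ x := by
        intro heq
        by_cases hx0 : 0 ≤ x
        · apply hroot0
          unfold isRootP
          rw [heq]
          unfold normIdx
          split <;> omega
        · omega
      have hinr : InR p.length (p.getD (normIdx p.length x) 0) := by
        constructor <;> omega
      have hnormpx : normIdx p.length (p.getD (normIdx p.length x) 0) = stepP p (normIdx p.length x) := by
        rw [normIdx_of_nonneg hpxb.1]; rfl
      have hroot' : isRootP p ((stepP p)^[m] (normIdx p.length (p.getD (normIdx p.length x) 0))) := by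
        rw [hnormpx, ← Function.iterate_succ_apply]
        exact hroot
      obtain ⟨p1, heq1, hlen1, hB1, hA1, hpres1⟩ :=
        ih f p (p.getD (normIdx p.length x) 0) hB hA hinr hroot' (by omega)
      rw [hnormpx, rootp_step hB hA hixlt] at heq1
      have hxin1 : InR p1.length x := by rw [hlen1]; exact hx
      have hnorm1 : normIdx p1.length x = normIdx p.length x := by rw [hlen1]
      have hset := pySet?_norm p1 x (((rootp p (normIdx p.length x) : Nat) : Int)) hxin1
      rw [hnorm1] at hset
      have hr1 : rootp p1 (normIdx p.length x) = rootp p (normIdx p.length x) :=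
        hpres1 _ hixlt
      obtain ⟨hlen2, hB2, hA2, hpres2⟩ :=
        compress_lemma hB1 hA1 (i := normIdx p.length x) (by omega)
      rw [hr1] at hlen2 hB2 hA2 hpres2
      set p2 := p1.set (normIdx p.length x) (((rootp p (normIdx p.length x) : Nat) : Int)) with hp2
      have hxin2 : InR p2.length x := by rw [hlen2, hlen1]; exact hx
      have hget2 := pyGet?_norm p2 x hxin2
      have hnorm2 : normIdx p2.length x = normIdx p.length x := by rw [hlen2, hlen1]
      rw [hnorm2] at hget2
      have hval2 : p2.getD (normIdx p.length x) 0 = ((rootp p (normIdx p.length x) : Nat) : Int) :=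
        getD_set_self p1 _ _ (by omega)
      refine ⟨p2, ?_, by omega, hB2, hA2, ?_⟩
      · rw [findA, hget]
        simp only [if_pos hpxne, heq1, hset, hget2, hval2]
      · intro j hj
        rw [hpres2 j (by omega), hpres1 j hj]

lemma findA_run {p : List Int} {x : Int} (hB : BoundsP p) (hA : AcycP p)
    (hx : InR p.length x) :
    ∃ p', findA (p.length + 1) x p = some (((rootp p (normIdx p.length x) : Nat) : Int), p') ∧
      p'.length = p.length ∧ BoundsP p' ∧ AcycP p' ∧
      (∀ j < p.length, rootp p' j = rootp p j) := by
  have hixlt := normIdx_lt hx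
  obtain ⟨m0, hm0⟩ := hA _ hixlt
  obtain ⟨m, hmlt, _, hm⟩ := pigeon hB hixlt hm0
  exact findA_ok m (p.length + 1) p x hB hA hx hm (by omega)

lemma unionA_run {p : List Int} {x y : Int} (hB : BoundsP p) (hA : AcycP p)
    (hx : InR p.length x) (hy : InR p.length y) :
    ∃ p', unionA x y p = some p' ∧ p'.length = p.length ∧ BoundsP p' ∧ AcycP p' ∧
      (∀ j < p.length, rootp p' j =
        if rootp p j = rootp p (normIdx p.length y) then rootp p (normIdx p.length x)
        else rootp p j) := by
  obtain ⟨p1, he1, hlen1, hB1, hA1, hpres1⟩ := findA_run hB hA hx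
  have hy1 : InR p1.length y := by rw [hlen1]; exact hy
  obtain ⟨p2, he2, hlen2, hB2, hA2, hpres2⟩ := findA_run hB1 hA1 hy1
  have hny : normIdx p1.length y = normIdx p.length y := by rw [hlen1]
  have hylt : normIdx p.length y < p.length := normIdx_lt hy
  have hxlt : normIdx p.length x < p.length := normIdx_lt hx
  have hry : rootp p1 (normIdx p.length y) = rootp p (normIdx p.length y) := hpres1 _ hylt
  rw [hny, hry] at he2
  set rx := rootp p (normIdx p.length x) with hrx
  set ry := rootp p (normIdx p.length y) with hryd
  have hrxlt : rx < p.length := rootp_lt hB hxlt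
  have hrylt : ry < p.length := rootp_lt hB hylt
  have hpres12 : ∀ j < p.length, rootp p2 j = rootp p j := by
    intro j hj
    rw [hpres2 j (by omega), hpres1 j hj]
  have hrooty2 : isRootP p2 ry := by
    have h1 : rootp p2 ry = ry := by
      rw [hpres12 ry hrylt]
      exact rootp_fix hB hrylt (rootp_isRoot hB hA hylt)
    have h2 := rootp_isRoot hB2 hA2 (j := ry) (by omega)
    rwa [h1] at h2
  by_cases hne : rx = ry
  · refine ⟨p2, ?_, by omega, hB2, hA2, ?_⟩
    · rw [unionA]
      simp only [he1, he2, hne, ne_eq, not_true_eq_false, if_false]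
    · intro j hj
      rw [hpres12 j hj, ← hne]
      split <;> simp_all
  · have hrootx2 : isRootP p2 rx := by
      have h1 : rootp p2 rx = rx := by
        rw [hpres12 rx hrxlt]
        exact rootp_fix hB hrxlt (rootp_isRoot hB hA hxlt)
      have h2 := rootp_isRoot hB2 hA2 (j := rx) (by omega)
      rwa [h1] at h2
    have hset : PySem.List.pySet? p2 ((ry : Nat) : Int) ((rx : Nat) : Int) =
        some (p2.set ry ((rx : Nat) : Int)) := by
      rw [pySet?_norm p2 _ _ (by constructor <;> omega), normIdx_natCast]
    obtain ⟨hlen3, hB3, hA3, hroot3⟩ :=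
      union_lemma hB2 hA2 (rx := rx) (ry := ry) (by omega) (by omega) hrootx2 hrooty2 hne
    refine ⟨p2.set ry ((rx : Nat) : Int), ?_, by simp; omega, hB3, hA3, ?_⟩
    · rw [unionA]
      simp only [he1, he2, ne_eq, Int.natCast_inj, hne, not_false_eq_true, if_true]
      exact hset
    · intro j hj
      rw [hroot3 j (by omega), hpres12 j hj]

def SimPC (p comp : List Int) : Prop :=
  p.length = comp.length ∧ BoundsP p ∧ AcycP p ∧
  ∀ i j, i < p.length → j < p.length →
    (comp.getD i 0 = comp.getD j 0 ↔ rootp p i = rootp p j)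

lemma mergeB_getD (comp : List Int) (old b : Int) {i : Nat} (hi : i < comp.length) :
    (mergeB comp old b).getD i 0 = if comp.getD i 0 = old then b else comp.getD i 0 := by
  unfold mergeB
  rw [List.getD_eq_getElem?_getD, List.getElem?_map, List.getElem?_eq_getElem hi,
    List.getD_eq_getElem?_getD, List.getElem?_eq_getElem hi]
  rfl

lemma attend_sim : ∀ (atts : List Int) (p comp : List Int) (base blabel : Int),
    SimPC p comp → InR p.length base →
    (∀ a ∈ atts, InR p.length a) →
    comp.getD (normIdx p.length base) 0 = blabel →
    ∃ p' comp', attendLoopA base atts p = some p' ∧ attendLoopB blabel atts comp = some comp' ∧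
      SimPC p' comp' ∧ p'.length = p.length ∧
      comp'.getD (normIdx p.length base) 0 = blabel := by
  intro atts
  induction atts with
  | nil =>
    intro p comp base blabel hS _ _ hbl
    exact ⟨p, comp, rfl, rfl, hS, rfl, hbl⟩
  | cons a rest ih =>
    intro p comp base blabel hS hbase hin hbl
    obtain ⟨hlc, hB, hA, hiff⟩ := hS
    have ha : InR p.length a := hin a (by simp)
    have hiblt : normIdx p.length base < p.length := normIdx_lt hbase
    have hialt : normIdx p.length a < p.length := normIdx_lt ha
    obtain ⟨p1, he1, hlen1, hB1, hA1, hform⟩ := unionA_run hB hA hbase ha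
    have hgetB : PySem.List.pyGet? comp a =
        some (comp.getD (normIdx p.length a) 0) := by
      have : InR comp.length a := by rw [← hlc]; exact ha
      rw [pyGet?_norm comp a this, ← hlc]
    set old := comp.getD (normIdx p.length a) 0 with holdd
    set ry := rootp p (normIdx p.length a) with hryd
    set rx := rootp p (normIdx p.length base) with hrxd
    have hkey : ∀ i, i < p.length →
        ((comp.getD i 0 = old ↔ rootp p i = ry) ∧
         (comp.getD i 0 = blabel ↔ rootp p i = rx)) := by
      intro i hi
      constructor
      · exact hiff i _ hi hialt
      · rw [← hbl]; exact hiff i _ hi hiblt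
    by_cases hlab : old = blabel
    · -- no-op merge on both sides
      have hrxy : rx = ry := by
        have := (hiff _ _ hialt hiblt).mp (by rw [← holdd, hbl, hlab])
        rw [← hryd, ← hrxd] at this
        exact this.symm
      have hform' : ∀ j < p.length, rootp p1 j = rootp p j := by
        intro j hj
        rw [hform j hj, hrxy]
        split <;> simp_all
      have hS1 : SimPC p1 comp := by
        refine ⟨by omega, hB1, hA1, ?_⟩
        intro i j hi hj
        rw [hlen1] at hi hj
        rw [hform' i hi, hform' j hj]
        exact hiff i j hi hj
      obtain ⟨p', comp', hA', hB', hS', hlen', hbl'⟩ :=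
        ih p1 comp base blabel hS1 (by rw [hlen1]; exact hbase)
          (by rw [hlen1]; exact fun x hx => hin x (by simp [hx]))
          (by rw [hlen1]; exact hbl)
      refine ⟨p', comp', ?_, ?_, hS', by omega, ?_⟩
      · rw [attendLoopA]
        simp only [he1]
        exact hA'
      · rw [attendLoopB]
        simp only [hgetB, hlab, ne_eq, not_true_eq_false, if_false]
        exact hB'
      · rw [hlen1] at hbl'
        exact hbl'
    · -- real merge
      have hrxy : rx ≠ ry := by
        intro hcon
        apply hlab
        have := (hiff _ _ hialt hiblt).mpr (by rw [← hryd, ← hrxd, hcon])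
        rw [← holdd, hbl] at this
        exact this
      have hmlen : (mergeB comp old blabel).length = comp.length := by
        unfold mergeB; simp
      have hS1 : SimPC p1 (mergeB comp old blabel) := by
        refine ⟨by omega, hB1, hA1, ?_⟩
        intro i j hi hj
        rw [hlen1] at hi hj
        rw [mergeB_getD comp old blabel (by omega), mergeB_getD comp old blabel (by omega),
          hform i hi, hform j hj]
        obtain ⟨hk1i, hk2i⟩ := hkey i hi
        obtain ⟨hk1j, hk2j⟩ := hkey j hj
        by_cases h1 : comp.getD i 0 = old <;> by_cases h2 : comp.getD j 0 = old
        · rw [if_pos h1, if_pos h2, if_pos (hk1i.mp h1), if_pos (hk1j.mp h2)]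
          simp
        · have hrj : ¬ rootp p j = ry := fun hc => h2 (hk1j.mpr hc)
          simp only [if_pos h1, if_neg h2, if_pos (hk1i.mp h1), if_neg hrj]
          constructor
          · intro h; exact (hk2j.mp h.symm).symm
          · intro h; exact (hk2j.mpr h.symm).symm
        · have hri : ¬ rootp p i = ry := fun hc => h1 (hk1i.mpr hc)
          simp only [if_neg h1, if_pos h2, if_neg hri, if_pos (hk1j.mp h2)]
          constructor
          · intro h; exact hk2i.mp h
          · intro h; exact hk2i.mpr h
        · have hri : ¬ rootp p i = ry := fun hc => h1 (hk1i.mpr hc)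
          have hrj : ¬ rootp p j = ry := fun hc => h2 (hk1j.mpr hc)
          simp only [if_neg h1, if_neg h2, if_neg hri, if_neg hrj]
          exact hiff i j hi hj
      have hbl1 : (mergeB comp old blabel).getD (normIdx p.length base) 0 = blabel := by
        rw [mergeB_getD comp old blabel (by omega), hbl]
        simp [Ne.symm hlab]
      obtain ⟨p', comp', hA', hB', hS', hlen', hbl'⟩ :=
        ih p1 (mergeB comp old blabel) base blabel hS1 (by rw [hlen1]; exact hbase)
          (by rw [hlen1]; exact fun x hx => hin x (by simp [hx]))
          (by rw [hlen1]; exact hbl1)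
      refine ⟨p', comp', ?_, ?_, hS', by omega, ?_⟩
      · rw [attendLoopA]
        simp only [he1]
        exact hA'
      · rw [attendLoopB]
        simp only [hgetB, ne_eq, hlab, not_false_eq_true, if_true]
        exact hB'
      · rw [hlen1] at hbl'
        exact hbl'

lemma parties_sim : ∀ (ps : List (List Int)) (p comp : List Int),
    SimPC p comp →
    (∀ party ∈ ps, party ≠ [] ∧ ∀ a ∈ party, InR p.length a) →
    ∃ p' comp', partiesLoopA ps p = some p' ∧ partiesLoopB ps comp = some comp' ∧
      SimPC p' comp' ∧ p'.length = p.length := by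
  intro ps
  induction ps with
  | nil => intro p comp hS _; exact ⟨p, comp, rfl, rfl, hS, rfl⟩
  | cons party rest ih =>
    intro p comp hS hin
    obtain ⟨hne, hinp⟩ := hin party (by simp)
    obtain ⟨b0, t, rfl⟩ : ∃ b0 t, party = b0 :: t := by
      cases party with
      | nil => exact absurd rfl hne
      | cons b0 t => exact ⟨b0, t, rfl⟩
    have hb0 : InR p.length b0 := hinp b0 (by simp)
    have hget0 : PySem.List.pyGet? (b0 :: t) (0 : Int) = some b0 := by
      rw [PySem.List.pyGet?_zero]; rfl
    have hgetb : PySem.List.pyGet? comp b0 =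
        some (comp.getD (normIdx p.length b0) 0) := by
      have : InR comp.length b0 := by rw [← hS.1]; exact hb0
      rw [pyGet?_norm comp b0 this, ← hS.1]
    have hslice : PySem.List.slice (b0 :: t) (some 1) none = t := by
      rw [PySem.List.slice_from_one]; rfl
    obtain ⟨p1, comp1, heA, heB, hS1, hlen1, _⟩ :=
      attend_sim t p comp b0 (comp.getD (normIdx p.length b0) 0) hS hb0
        (fun a ha => hinp a (by simp [ha])) rfl
    obtain ⟨p', comp', hA', hB', hS', hlen'⟩ :=
      ih p1 comp1 hS1
        (by
          intro pa hpa
          obtain ⟨h1, h2⟩ := hin pa (by simp [hpa])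
          exact ⟨h1, by rw [hlen1]; exact h2⟩)
    refine ⟨p', comp', ?_, ?_, hS', by omega⟩
    · rw [partiesLoopA]
      simp only [hget0, hslice, heA]
      exact hA'
    · rw [partiesLoopB]
      simp only [hget0, hgetb, hslice, heB]
      exact hB'

lemma truth_sim : ∀ (us : List Int) (p comp : List Int) (accA accB : PySem.Set Int),
    SimPC p comp → (∀ u ∈ us, InR p.length u) →
    (∀ i, i < p.length → ((((rootp p i : Nat) : Int) ∈ accA) ↔ comp.getD i 0 ∈ accB)) →
    ∃ tr p' trB, trootsLoopA us accA p = some (tr, p') ∧ truthLoopB us accB comp = some trB ∧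
      SimPC p' comp ∧ p'.length = p.length ∧
      (∀ i, i < p.length → ((((rootp p' i : Nat) : Int) ∈ tr) ↔ comp.getD i 0 ∈ trB)) := by
  intro us
  induction us with
  | nil => intro p comp accA accB hS _ hmem; exact ⟨accA, p, accB, rfl, rfl, hS, rfl, hmem⟩
  | cons u rest ih =>
    intro p comp accA accB hS hin hmem
    obtain ⟨hlc, hB, hA, hiff⟩ := hS
    have hu : InR p.length u := hin u (by simp)
    have hult := normIdx_lt hu
    obtain ⟨p1, he1, hlen1, hB1, hA1, hpres1⟩ := findA_run hB hA hu
    have hgetB : PySem.List.pyGet? comp u =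
        some (comp.getD (normIdx p.length u) 0) := by
      have : InR comp.length u := by rw [← hlc]; exact hu
      rw [pyGet?_norm comp u this, ← hlc]
    have hS1 : SimPC p1 comp := by
      refine ⟨by omega, hB1, hA1, ?_⟩
      intro i j hi hj
      rw [hlen1] at hi hj
      rw [hpres1 i hi, hpres1 j hj]
      exact hiff i j hi hj
    have hmem1 : ∀ i, i < p1.length →
        ((((rootp p1 i : Nat) : Int) ∈ PySem.Set.add accA ((rootp p (normIdx p.length u) : Nat) : Int)) ↔
          comp.getD i 0 ∈ PySem.Set.add accB (comp.getD (normIdx p.length u) 0)) := by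
      intro i hi
      rw [hlen1] at hi
      rw [hpres1 i hi, PySem.Set.mem_add, PySem.Set.mem_add]
      constructor
      · rintro (h | h)
        · exact Or.inl ((hmem i hi).mp h)
        · refine Or.inr ?_
          exact (hiff i _ hi hult).mpr (by exact_mod_cast h)
      · rintro (h | h)
        · exact Or.inl ((hmem i hi).mpr h)
        · refine Or.inr ?_
          exact_mod_cast congrArg (fun (k : Nat) => ((k : Nat) : Int))
            ((hiff i _ hi hult).mp h)
    obtain ⟨tr, p', trB, hA', hB', hS', hlen', hmem'⟩ :=
      ih p1 comp _ _ hS1 (by rw [hlen1]; exact fun x hx => hin x (by simp [hx])) hmem1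
    refine ⟨tr, p', trB, ?_, ?_, hS', by omega, by rw [hlen1] at hmem'; exact hmem'⟩
    · rw [trootsLoopA]
      simp only [he1]
      exact hA'
    · rw [truthLoopB]
      simp only [hgetB]
      exact hB'

lemma any_sim : ∀ (party : List Int) (p comp : List Int) (tr trB : PySem.Set Int),
    SimPC p comp → (∀ a ∈ party, InR p.length a) →
    (∀ i, i < p.length → ((((rootp p i : Nat) : Int) ∈ tr) ↔ comp.getD i 0 ∈ trB)) →
    ∃ b p', anyLoopA tr party p = some (b, p') ∧ allLoopB trB party comp = some (!b) ∧
      SimPC p' comp ∧ p'.length = p.length ∧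
      (∀ i, i < p.length → ((((rootp p' i : Nat) : Int) ∈ tr) ↔ comp.getD i 0 ∈ trB)) := by
  intro party
  induction party with
  | nil => intro p comp tr trB hS _ hmem; exact ⟨false, p, rfl, rfl, hS, rfl, hmem⟩
  | cons a rest ih =>
    intro p comp tr trB hS hin hmem
    obtain ⟨hlc, hB, hA, hiff⟩ := hS
    have ha : InR p.length a := hin a (by simp)
    have halt := normIdx_lt ha
    obtain ⟨p1, he1, hlen1, hB1, hA1, hpres1⟩ := findA_run hB hA ha
    have hgetB : PySem.List.pyGet? comp a =
        some (comp.getD (normIdx p.length a) 0) := by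
      have : InR comp.length a := by rw [← hlc]; exact ha
      rw [pyGet?_norm comp a this, ← hlc]
    have hS1 : SimPC p1 comp := by
      refine ⟨by omega, hB1, hA1, ?_⟩
      intro i j hi hj
      rw [hlen1] at hi hj
      rw [hpres1 i hi, hpres1 j hj]
      exact hiff i j hi hj
    have hmem1 : ∀ i, i < p1.length →
        ((((rootp p1 i : Nat) : Int) ∈ tr) ↔ comp.getD i 0 ∈ trB) := by
      intro i hi
      rw [hlen1] at hi
      rw [hpres1 i hi]
      exact hmem i hi
    by_cases hmb : ((rootp p (normIdx p.length a) : Nat) : Int) ∈ tr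
    · have hcA : PySem.Set.contains tr ((rootp p (normIdx p.length a) : Nat) : Int) = true :=
        (PySem.Set.contains_iff tr _).mpr hmb
      have hcB : PySem.Set.contains trB (comp.getD (normIdx p.length a) 0) = true :=
        (PySem.Set.contains_iff trB _).mpr ((hmem _ halt).mp hmb)
      refine ⟨true, p1, ?_, ?_, hS1, by omega, by rw [hlen1] at hmem1; exact hmem1⟩
      · rw [anyLoopA]
        simp only [he1, hcA, if_true]
      · rw [allLoopB]
        simp only [hgetB, hcB, if_true]
        rfl
    · have hcA : PySem.Set.contains tr ((rootp p (normIdx p.length a) : Nat) : Int) = false := by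
        rw [← Bool.not_eq_true]
        intro hc
        exact hmb ((PySem.Set.contains_iff tr _).mp hc)
      have hcB : PySem.Set.contains trB (comp.getD (normIdx p.length a) 0) = false := by
        rw [← Bool.not_eq_true]
        intro hc
        exact hmb ((hmem _ halt).mpr ((PySem.Set.contains_iff trB _).mp hc))
      obtain ⟨b, p', hA', hB', hS', hlen', hmem'⟩ :=
        ih p1 comp tr trB hS1 (by rw [hlen1]; exact fun x hx => hin x (by simp [hx])) hmem1
      refine ⟨b, p', ?_, ?_, hS', by omega, by rw [hlen1] at hmem'; exact hmem'⟩
      · rw [anyLoopA]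
        simp only [he1, hcA, if_false, Bool.false_eq_true]
        exact hA'
      · rw [allLoopB]
        simp only [hgetB, hcB, if_false, Bool.false_eq_true]
        exact hB'

lemma count_sim : ∀ (ps : List (List Int)) (p comp : List Int) (tr trB : PySem.Set Int) (res : Int),
    SimPC p comp → (∀ pa ∈ ps, ∀ a ∈ pa, InR p.length a) →
    (∀ i, i < p.length → ((((rootp p i : Nat) : Int) ∈ tr) ↔ comp.getD i 0 ∈ trB)) →
    ∃ r, countLoopA tr ps res p = some r ∧ countLoopB trB ps res comp = some r := by
  intro ps
  induction ps with
  | nil => intro p comp tr trB res _ _ _; exact ⟨res, rfl, rfl⟩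
  | cons party rest ih =>
    intro p comp tr trB res hS hin hmem
    obtain ⟨b, p1, heA, heB, hS1, hlen1, hmem1⟩ :=
      any_sim party p comp tr trB hS (hin party (by simp)) hmem
    obtain ⟨r, hrA, hrB⟩ :=
      ih p1 comp tr trB (if b then res else res + 1) hS1
        (by rw [hlen1]; exact fun pa hpa => hin pa (by simp [hpa]))
        (by rw [hlen1]; exact hmem1)
    refine ⟨r, ?_, ?_⟩
    · rw [countLoopA]
      simp only [heA]
      exact hrA
    · rw [countLoopB]
      simp only [heB]
      have : (if (!b) = true then res + 1 else res) = (if b = true then res else res + 1) := by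
        cases b <;> simp
      rw [this]
      exact hrB

lemma pyRange_rep (n : Int) :
    PySem.List.pyRange 0 (n + 1) 1 = (List.range (n + 1).toNat).map (fun k : Nat => Int.ofNat k) := by
  rw [PySem.List.pyRange_of_pos 0 (n + 1) (by omega)]
  have h1 : ((n + 1 - 0 + 1 - 1) / 1 : Int) = n + 1 := by omega
  rw [h1]
  have h2 : (if (0 : Int) < n + 1 then (n + 1).toNat else 0) = (n + 1).toNat := by
    split <;> omega
  rw [h2]
  apply List.map_congr_left
  intro k _
  simp [Int.ofNat_eq_natCast]

lemma init_len (n : Int) : (PySem.List.pyRange 0 (n + 1) 1).length = (n + 1).toNat := by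
  rw [pyRange_rep]; simp

lemma init_getD (n : Int) {i : Nat} (hi : i < (n + 1).toNat) :
    (PySem.List.pyRange 0 (n + 1) 1).getD i 0 = (i : Int) := by
  rw [pyRange_rep]
  have hlen : i < ((List.range (n + 1).toNat).map (fun k : Nat => Int.ofNat k)).length := by
    simpa using hi
  rw [List.getD_eq_getElem?_getD, List.getElem?_eq_getElem hlen]
  simp [Int.ofNat_eq_natCast]

lemma init_sim (n : Int) : SimPC (PySem.List.pyRange 0 (n + 1) 1) (PySem.List.pyRange 0 (n + 1) 1) := by
  set p0 := PySem.List.pyRange 0 (n + 1) 1 with hp0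
  have hlen : p0.length = (n + 1).toNat := init_len n
  have hget : ∀ i, i < p0.length → p0.getD i 0 = (i : Int) := by
    intro i hi
    exact init_getD n (by omega)
  have hB : BoundsP p0 := by
    intro j hj
    rw [hget j hj]
    refine ⟨by omega, ?_⟩
    exact_mod_cast hj
  have hroot : ∀ j, j < p0.length → isRootP p0 j := by
    intro j hj
    exact hget j hj
  have hA : AcycP p0 := fun j hj => ⟨0, by simpa using hroot j hj⟩
  have hfix : ∀ j, j < p0.length → rootp p0 j = j := fun j hj =>
    rootp_fix hB hj (hroot j hj)
  refine ⟨rfl, hB, hA, ?_⟩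
  intro i j hi hj
  rw [hget i hi, hget j hj, hfix i hi, hfix j hj]
  constructor
  · exact_mod_cast fun h => h
  · intro h; exact_mod_cast h

lemma main_sim (n : Int) (us : List Int) (ps : List (List Int))
    (hpre1 : ∀ p ∈ ps, p ≠ [])
    (hpre2 : ∀ x ∈ us, -(n + 1) ≤ x ∧ x ≤ n)
    (hpre3 : ∀ p ∈ ps, ∀ x ∈ p, -(n + 1) ≤ x ∧ x ≤ n) :
    find_max_parties n us ps = find_max_parties_alt n us ps := by
  set p0 := PySem.List.pyRange 0 (n + 1) 1 with hp0
  have hlen : p0.length = (n + 1).toNat := init_len n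
  have hInR : ∀ x : Int, -(n + 1) ≤ x → x ≤ n → InR p0.length x := by
    intro x h1 h2
    constructor <;> · rw [hlen]; omega
  obtain ⟨p1, comp1, heA, heB, hS1, hlen1⟩ :=
    parties_sim ps p0 p0 (init_sim n)
      (fun pa hpa => ⟨hpre1 pa hpa, fun a ha =>
        hInR a (hpre3 pa hpa a ha).1 (hpre3 pa hpa a ha).2⟩)
  obtain ⟨tr, p2, trB, heT, heU, hS2, hlen2, hmem2⟩ :=
    truth_sim us p1 comp1 PySem.Set.empty PySem.Set.empty hS1
      (by rw [hlen1]; exact fun u hu => hInR u (hpre2 u hu).1 (hpre2 u hu).2)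
      (by intro i _; simp [PySem.Set.empty])
  obtain ⟨r, hrA, hrB⟩ :=
    count_sim ps p2 comp1 tr trB 0 hS2
      (by
        rw [hlen2, hlen1]
        exact fun pa hpa a ha => hInR a (hpre3 pa hpa a ha).1 (hpre3 pa hpa a ha).2)
      (by rw [hlen2]; exact hmem2)
  unfold find_max_parties find_max_parties_alt
  simp only [← hp0, heA, heB, heT, heU, hrA, hrB]

-- ===== VERDICT (by name: the statement is the Claim_ definition above) =====
theorem find_max_parties_spec : Claim_equal_find_max_parties := by
  intro n us ps _ hpre
  obtain ⟨h1, h2, h3⟩ := hpre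
  unfold Spec_find_max_parties
  exact main_sim n us ps h1 h2 h3
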